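-- pv_equiv track=rewrite | github.com/Transient-Onlooker/golf-schedule-generator | 소스코드/golf_scheduler_gui.py | schedule_golf_groups
-- ===== SOURCE A (Python) =====
-- import collections
--
-- def schedule_golf_groups(players, reservations, group_size):
--     """예약자 기능을 포함한 최적의 골프 조를 편성하는 로직"""
--     play_counts = collections.defaultdict(int)
--     reservation_counts = collections.defaultdict(int)
--     for _, reserved_player in reservations:
--         if reserved_player:
--             reservation_counts[reserved_player] += 1
--     schedule = {}
--     last_round_players = set()
--
--     for date, reserved_player in reservations:
--         current_group = []
--         if reserved_player and reserved_player in players: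
--             current_group.append(reserved_player)
--
--         needed = group_size - len(current_group)
--         if needed > 0:
--             available_players = [p for p in players if p not in last_round_players and p not in current_group]
--             if len(available_players) < needed:
--                 candidates = [p for p in players if p not in current_group]
--             else:
--                 candidates = available_players
--             candidates.sort(key=lambda p: (play_counts[p], -reservation_counts[p], p))
--             current_group.extend(candidates[:needed])
--
--         schedule[date] = sorted(current_group)
--         for player in current_group:
--             play_counts[player] += 1
--         last_round_players = set(current_group)
--
--     return schedule, play_counts
-- ===== SOURCE B (Python) =====
-- import collections
--
-- def schedule_golf_groups(players, reservations, group_size):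
--     """Same schedule; instead of sorting the whole candidate list each round by the
--     3-part key, bucket candidates by play count (the dominant key component), then
--     sort and consume buckets in increasing count order, stopping once the group is full."""
--     reservation_counts = collections.Counter(r for _, r in reservations if r)
--     play_counts = {}
--     schedule = {}
--     prev_group = set()
--
--     for date, reserved_player in reservations:
--         current_group = []
--         if reserved_player and reserved_player in players:
--             current_group.append(reserved_player)
--
--         needed = group_size - len(current_group)
--         if needed > 0:
--             base = [p for p in players if p not in current_group]
--             available = [p for p in base if p not in prev_group]
--             pool = available if len(available) >= needed else base
--             buckets = {}
--             for p in pool: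
--                 c = play_counts.setdefault(p, 0)
--                 buckets.setdefault(c, []).append(p)
--             take = min(needed, len(pool))
--             for c in sorted(buckets):
--                 if take <= 0:
--                     break
--                 bucket = sorted(buckets[c], key=lambda p: (-reservation_counts[p], p))
--                 chunk = bucket[:take]
--                 current_group.extend(chunk)
--                 take -= len(chunk)
--
--         schedule[date] = sorted(current_group)
--         for player in current_group:
--             play_counts[player] = play_counts.get(player, 0) + 1
--         prev_group = set(current_group)
--
--     return schedule, play_counts
-- ===== Notes on version B (the rewrite author's own statement) =====
-- stated objective: alternative
-- what changed: Each round, instead of sorting the whole candidate list by the 3-part key (play_count, -reservations, name), B buckets candidates by play count, then sorts and consumes buckets in increasing count order with a 2-part key, stopping once the group is full; the reservation tally is built with collections.Counter and the two availability filters are composed.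
import Mathlib
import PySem

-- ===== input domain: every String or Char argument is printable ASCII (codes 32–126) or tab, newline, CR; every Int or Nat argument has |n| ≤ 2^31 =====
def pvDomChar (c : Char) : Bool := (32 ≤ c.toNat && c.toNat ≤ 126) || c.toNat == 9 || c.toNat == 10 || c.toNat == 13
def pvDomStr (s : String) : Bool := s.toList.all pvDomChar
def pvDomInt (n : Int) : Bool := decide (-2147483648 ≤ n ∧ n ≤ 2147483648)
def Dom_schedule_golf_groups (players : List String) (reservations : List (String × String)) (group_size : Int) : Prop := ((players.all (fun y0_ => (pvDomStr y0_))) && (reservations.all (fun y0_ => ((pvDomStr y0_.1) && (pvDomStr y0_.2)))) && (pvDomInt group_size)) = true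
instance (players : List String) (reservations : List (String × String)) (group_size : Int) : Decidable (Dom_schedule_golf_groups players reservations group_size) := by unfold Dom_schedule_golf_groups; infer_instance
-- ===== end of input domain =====

-- B replaces A's per-round full sort of the candidate list under the 3-part key by
-- bucketing candidates on play count and sorting/consuming buckets in increasing count
-- order until the group is full; the reservation tally becomes a Counter and the two
-- availability filters are composed.  The return value is proved identical.

-- ===== PORT A =====
-- Python's '<' on the 3-tuple sort key (play_count, -reservation_count, name):
-- lexicographic comparison, hand-ported (exact; Lean's Prod '<' is pointwise, so
-- PySem.List.sorted cannot take this 3-tuple key).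
def pvKeyLt (a b : Int × Int × String) : Bool :=
  a.1 < b.1 || (a.1 == b.1 && (a.2.1 < b.2.1 || (a.2.1 == b.2.1 && a.2.2 < b.2.2)))

-- A's key lambda: p ↦ (play_counts[p], -reservation_counts[p], p)
def pvKey (pc rc : PySem.Dict String Int) (p : String) : Int × Int × String :=
  (pc.getD p 0, -(rc.getD p 0), p)

-- candidates.sort(key=…): CPython's stable sort, written exactly as PySem.List.sorted's
-- insertion-sort shape but with the lexicographic tuple comparison above (hand-ported, exact).
def pvSortBy (key : String → Int × Int × String) (xs : List String) : List String :=
  xs.foldl (fun acc x => PySem.List.insertBy (fun a b => pvKeyLt (key a) (key b)) x acc) []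

-- list.sort computes key(p) once per element, in list order, BEFORE comparing; each read of
-- the defaultdict play_counts inserts a missing key with value 0 (observable in the returned
-- dict): modelled by this fold (exact).
def pvTouch (pc : PySem.Dict String Int) (xs : List String) : PySem.Dict String Int :=
  xs.foldl (fun d p => if (d.get? p).isSome then d else d.insert p 0) pc

-- one iteration of A's 'for date, reserved_player in reservations' loop
def pvStepA (players : List String) (rc : PySem.Dict String Int) (group_size : Int)
    (st : PySem.Dict String (List String) × PySem.Dict String Int × PySem.Set String)
    (dr : String × String) :
    PySem.Dict String (List String) × PySem.Dict String Int × PySem.Set String :=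
  let g0 : List String := if !(dr.2 == "") && players.contains dr.2 then [dr.2] else []
  let needed : Int := group_size - (g0.length : Int)
  let gp : List String × PySem.Dict String Int :=
    if needed > 0 then
      let avail := players.filter (fun p => !(PySem.Set.contains st.2.2 p) && !(g0.contains p))
      let cand := if (avail.length : Int) < needed
                  then players.filter (fun p => !(g0.contains p)) else avail
      let pc1 := pvTouch st.2.1 cand
      -- candidates[:needed] with needed > 0 (guarded just above) is .take needed.toNat (exact)
      (g0 ++ (pvSortBy (pvKey pc1 rc) cand).take needed.toNat, pc1)
    else (g0, st.2.1)
  (st.1.insert dr.1 (PySem.List.sorted gp.1 (fun x => x)),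
   -- play_counts[player] += 1 on a defaultdict: read-or-0 then store (new keys append)
   gp.1.foldl (fun d p => d.insert p (d.getD p 0 + 1)) gp.2,
   PySem.Set.ofList gp.1)

def schedule_golf_groups (players : List String) (reservations : List (String × String)) (group_size : Int) : (List (String × List String)) × (List (String × Int)) :=
  -- reservation_counts[r] += 1 on a defaultdict, for truthy r
  let rc := reservations.foldl
    (fun d pr => if !(pr.2 == "") then d.insert pr.2 (d.getD pr.2 0 + 1) else d)
    (PySem.Dict.empty : PySem.Dict String Int)
  let st := reservations.foldl (pvStepA players rc group_size)
    ((PySem.Dict.empty : PySem.Dict String (List String)),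
     (PySem.Dict.empty : PySem.Dict String Int), (PySem.Set.empty : PySem.Set String))
  (st.1.items, st.2.1.items)

-- ===== PORT B =====
-- B's 'for c in sorted(buckets): if take <= 0: break; bucket = sorted(buckets[c], key=…);
-- chunk = bucket[:take]; current_group.extend(chunk); take -= len(chunk)' loop.
-- bucket[:take] with take > 0 (guarded) is .take take.toNat (exact).
def pvChunks (rc : PySem.Dict String Int) (buckets : PySem.Dict Int (List String)) :
    List Int → Int → List String
  | [], _ => []
  | c :: ks, take =>
    if take ≤ 0 then []
    else
      let chunk := (PySem.List.sorted2 (buckets.getD c [])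
        (fun p => -(rc.getD p 0)) (fun p => p)).take take.toNat
      chunk ++ pvChunks rc buckets ks (take - (chunk.length : Int))

-- B's round body up to the chosen group: reserved seed, candidate pool, then one pass that
-- runs play_counts.setdefault(p, 0) and buckets the pool by that count
-- (buckets.setdefault(c, []).append(p) is buckets[c] = buckets.get(c, []) + [p]),
-- then the bucket-consumption loop above; returns (current_group, updated play_counts)
def pvPickB (players : List String) (rc : PySem.Dict String Int) (group_size : Int)
    (pc : PySem.Dict String Int) (prev : PySem.Set String) (dr : String × String) :
    List String × PySem.Dict String Int :=
  let g0 : List String := if !(dr.2 == "") && players.contains dr.2 then [dr.2] else []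
  let needed : Int := group_size - (g0.length : Int)
  if needed > 0 then
    let base := players.filter (fun p => !(g0.contains p))
    let avail := base.filter (fun p => !(PySem.Set.contains prev p))
    let pool := if (avail.length : Int) ≥ needed then avail else base
    let pb := pool.foldl
      (fun (s : PySem.Dict String Int × PySem.Dict Int (List String)) p =>
        (if (s.1.get? p).isSome then s.1 else s.1.insert p 0,
         s.2.modify (s.1.getD p 0) [] (· ++ [p]))) (pc, PySem.Dict.empty)
    let ks := PySem.List.sorted pb.2.keys (fun c => c)
    (g0 ++ pvChunks rc pb.2 ks (min needed (pool.length : Int)), pb.1)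
  else (g0, pc)

-- B's 'for date, reserved_player in reservations' loop as structural recursion
def pvRoundsB (players : List String) (rc : PySem.Dict String Int) (group_size : Int) :
    List (String × String) → PySem.Dict String (List String) → PySem.Dict String Int →
    PySem.Set String → PySem.Dict String (List String) × PySem.Dict String Int
  | [], sched, pc, _ => (sched, pc)
  | dr :: rest, sched, pc, prev =>
    let gp := pvPickB players rc group_size pc prev dr
    pvRoundsB players rc group_size rest
      (sched.insert dr.1 (PySem.List.sorted gp.1 (fun x => x)))
      (gp.1.foldl (fun d p => d.insert p (d.getD p 0 + 1)) gp.2)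
      (PySem.Set.ofList gp.1)

def schedule_golf_groups_alt (players : List String) (reservations : List (String × String)) (group_size : Int) : (List (String × List String)) × (List (String × Int)) :=
  -- collections.Counter(r for _, r in reservations if r)
  let rc := PySem.Dict.counter ((reservations.map (fun pr => pr.2)).filter (fun r => !(r == "")))
  let sp := pvRoundsB players rc group_size reservations PySem.Dict.empty PySem.Dict.empty PySem.Set.empty
  (sp.1.items, sp.2.items)

-- ===== PRECONDITION & SPEC =====
def Spec_schedule_golf_groups (players : List String) (reservations : List (String × String)) (group_size : Int) (out : (List (String × List String)) × (List (String × Int))) : Prop := out = schedule_golf_groups_alt players reservations group_size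
instance (players : List String) (reservations : List (String × String)) (group_size : Int) (out : (List (String × List String)) × (List (String × Int))) : Decidable (Spec_schedule_golf_groups players reservations group_size out) := by unfold Spec_schedule_golf_groups; infer_instance

-- ===== CLAIM (what is proved, stated in full; the proofs are below) =====
def Claim_equal_schedule_golf_groups : Prop := ∀ (players : List String) (reservations : List (String × String)) (group_size : Int), Dom_schedule_golf_groups players reservations group_size → Spec_schedule_golf_groups players reservations group_size (schedule_golf_groups players reservations group_size)

-- ===== LEMMAS AND PROOFS =====

-- the comparator PySem.List.sorted2 uses for keys (r ·, identity)
def pvLt2 (r : String → Int) (a b : String) : Bool :=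
  decide (r a < r b) || (!decide (r b < r a) && decide (a < b))

def pvISort {α : Type} (lt : α → α → Bool) (xs : List α) : List α :=
  xs.foldl (fun acc x => PySem.List.insertBy lt x acc) []

theorem pvInsertBy_perm {α : Type} (before : α → α → Bool) (x : α) (ys : List α) :
    (PySem.List.insertBy before x ys).Perm (x :: ys) := by
  induction ys with
  | nil => simp [PySem.List.insertBy]
  | cons y ys ih =>
    by_cases h : before x y = true
    · simp [PySem.List.insertBy, h]
    · simp only [PySem.List.insertBy, h]
      simp only [Bool.false_eq_true, if_false]
      exact (ih.cons y).trans (List.Perm.swap x y ys)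

theorem pvInsertBy_pairwise {α : Type} (lt : α → α → Bool)
    (hasym : ∀ a b, lt a b = true → lt b a = false)
    (htrans : ∀ a b c, lt a b = true → lt b c = true → lt a c = true)
    (x : α) {ys : List α} (h : ys.Pairwise (fun a b => lt b a = false)) :
    (PySem.List.insertBy lt x ys).Pairwise (fun a b => lt b a = false) := by
  induction ys with
  | nil => simp [PySem.List.insertBy]
  | cons y ys ih =>
    rcases List.pairwise_cons.1 h with ⟨hy, hys⟩
    by_cases hxy : lt x y = true
    · simp only [PySem.List.insertBy, hxy, if_true]
      refine List.pairwise_cons.2 ⟨?_, h⟩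
      intro z hz
      rcases List.mem_cons.1 hz with rfl | hz'
      · exact hasym _ _ hxy
      · by_cases hzx : lt z x = true
        · exact absurd (htrans _ _ _ hzx hxy) (by simp [hy z hz'])
        · simpa using hzx
    · simp only [PySem.List.insertBy, hxy]
      simp only [Bool.false_eq_true, if_false]
      refine List.pairwise_cons.2 ⟨?_, ih hys⟩
      intro z hz
      rcases (PySem.List.mem_insertBy _ x z ys).1 hz with rfl | hz'
      · simpa using hxy
      · exact hy z hz'

theorem pvISort_aux {α : Type} (lt : α → α → Bool)
    (hasym : ∀ a b, lt a b = true → lt b a = false)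
    (htrans : ∀ a b c, lt a b = true → lt b c = true → lt a c = true)
    (l : List α) :
    ∀ acc : List α, acc.Pairwise (fun a b => lt b a = false) →
      (l.foldl (fun acc x => PySem.List.insertBy lt x acc) acc).Perm (acc ++ l) ∧
      (l.foldl (fun acc x => PySem.List.insertBy lt x acc) acc).Pairwise
        (fun a b => lt b a = false) := by
  induction l with
  | nil => intro acc h; simpa using h
  | cons x l ih =>
    intro acc h
    obtain ⟨hp, hs⟩ := ih _ (pvInsertBy_pairwise lt hasym htrans x h)
    refine ⟨?_, hs⟩
    simp only [List.foldl_cons]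
    refine hp.trans ?_
    exact ((pvInsertBy_perm lt x acc).append_right l).trans List.perm_middle.symm

theorem pvISort_perm {α : Type} (lt : α → α → Bool)
    (hasym : ∀ a b, lt a b = true → lt b a = false)
    (htrans : ∀ a b c, lt a b = true → lt b c = true → lt a c = true)
    (l : List α) : (pvISort lt l).Perm l :=
  (pvISort_aux lt hasym htrans l [] (by simp)).1

theorem pvISort_pairwise {α : Type} (lt : α → α → Bool)
    (hasym : ∀ a b, lt a b = true → lt b a = false)
    (htrans : ∀ a b c, lt a b = true → lt b c = true → lt a c = true)
    (l : List α) : (pvISort lt l).Pairwise (fun a b => lt b a = false) :=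
  (pvISort_aux lt hasym htrans l [] (by simp)).2

theorem pvSorted_unique {α : Type} (lt : α → α → Bool)
    (hanti : ∀ a b, lt a b = false → lt b a = false → a = b)
    {l₁ l₂ : List α} (hp : l₁.Perm l₂)
    (h1 : l₁.Pairwise (fun a b => lt b a = false))
    (h2 : l₂.Pairwise (fun a b => lt b a = false)) : l₁ = l₂ := by
  refine hp.eq_of_pairwise ?_ h1 h2
  intro a b _ _ hab hba
  exact hanti _ _ hba hab

theorem pvISort_eq_of_perm_of_pairwise {α : Type} (lt : α → α → Bool)
    (hasym : ∀ a b, lt a b = true → lt b a = false)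
    (htrans : ∀ a b c, lt a b = true → lt b c = true → lt a c = true)
    (hanti : ∀ a b, lt a b = false → lt b a = false → a = b)
    {l m : List α} (hp : m.Perm l)
    (h : m.Pairwise (fun a b => lt b a = false)) : pvISort lt l = m :=
  pvSorted_unique lt hanti ((pvISort_perm lt hasym htrans l).trans hp.symm)
    (pvISort_pairwise lt hasym htrans l) h

theorem pvLt2_asymm (r : String → Int) : ∀ a b, pvLt2 r a b = true → pvLt2 r b a = false := by
  intro a b h
  simp [pvLt2] at h ⊢
  rcases h with h | ⟨h1, h2⟩
  · exact ⟨le_of_lt h, fun h' => absurd h (not_lt.2 h')⟩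
  · exact ⟨h1, fun _ => le_of_lt h2⟩

theorem pvLt2_trans (r : String → Int) :
    ∀ a b c, pvLt2 r a b = true → pvLt2 r b c = true → pvLt2 r a c = true := by
  intro a b c h1 h2
  simp [pvLt2] at h1 h2 ⊢
  rcases h1 with h1 | ⟨e1, h1⟩ <;> rcases h2 with h2 | ⟨e2, h2⟩
  · exact Or.inl (lt_trans h1 h2)
  · exact Or.inl (lt_of_lt_of_le h1 e2)
  · exact Or.inl (lt_of_le_of_lt e1 h2)
  · exact Or.inr ⟨le_trans e1 e2, lt_trans h1 h2⟩


theorem pvKeyLt_antisymm {a b : Int × Int × String}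
    (h1 : pvKeyLt a b = false) (h2 : pvKeyLt b a = false) : a = b := by
  obtain ⟨a1,a2,a3⟩ := a; obtain ⟨b1,b2,b3⟩ := b
  simp [pvKeyLt] at h1 h2
  have e1 : a1 = b1 := le_antisymm h2.1 h1.1
  have e2 : a2 = b2 := le_antisymm (h2.2 e1.symm).1 (h1.2 e1).1
  have e3 : a3 = b3 := by
    have := le_antisymm ((h2.2 e1.symm).2 e2.symm) ((h1.2 e1).2 e2)
    exact String.toList_inj.mp this
  simp [e1, e2, e3]

theorem pvKeyLt_asymm {a b : Int × Int × String} (h : pvKeyLt a b = true) :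
    pvKeyLt b a = false := by
  obtain ⟨a1,a2,a3⟩ := a; obtain ⟨b1,b2,b3⟩ := b
  simp [pvKeyLt] at h ⊢
  rcases h with h | ⟨e1, h⟩
  · exact ⟨le_of_lt h, fun e => by omega⟩
  · refine ⟨by omega, fun _ => ?_⟩
    rcases h with h | ⟨e2, h⟩
    · exact ⟨le_of_lt h, by omega⟩
    · exact ⟨by omega, fun _ => le_of_lt h⟩

theorem pvKeyLt_trans {a b c : Int × Int × String}
    (h1 : pvKeyLt a b = true) (h2 : pvKeyLt b c = true) : pvKeyLt a c = true := by
  obtain ⟨a1,a2,a3⟩ := a; obtain ⟨b1,b2,b3⟩ := b; obtain ⟨c1,c2,c3⟩ := c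
  simp [pvKeyLt] at h1 h2 ⊢
  rcases h1 with h1 | ⟨e1, h1⟩ <;> rcases h2 with h2 | ⟨f1, h2⟩
  · exact Or.inl (lt_trans h1 h2)
  · exact Or.inl (by omega)
  · exact Or.inl (by omega)
  · refine Or.inr ⟨by omega, ?_⟩
    rcases h1 with h1 | ⟨e2, h1⟩ <;> rcases h2 with h2 | ⟨f2, h2⟩
    · exact Or.inl (lt_trans h1 h2)
    · exact Or.inl (by omega)
    · exact Or.inl (by omega)
    · exact Or.inr ⟨by omega, lt_trans h1 h2⟩

-- lifting the bucket-local order to the full-key order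

theorem pvLift_same {cnt r : String → Int} {a b : String} (hc : cnt a = cnt b)
    (h : pvLt2 r b a = false) :
    pvKeyLt (cnt b, r b, b) (cnt a, r a, a) = false := by
  simp [pvLt2] at h
  simp [pvKeyLt]
  exact ⟨le_of_eq hc, fun e => ⟨h.1, fun e2 => h.2 (le_of_eq e2)⟩⟩

theorem pvLift_cross {cnt r : String → Int} {a b : String} (hc : cnt a < cnt b) :
    pvKeyLt (cnt b, r b, b) (cnt a, r a, a) = false := by
  simp [pvKeyLt]
  exact ⟨le_of_lt hc, fun e => by omega⟩

theorem pvFlatMap_perm {α β : Type} (l : List α) (f g : α → List β)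
    (h : ∀ x ∈ l, (f x).Perm (g x)) : (l.flatMap f).Perm (l.flatMap g) := by
  induction l with
  | nil => simp
  | cons x l ih =>
    simp only [List.flatMap_cons]
    exact (h x (by simp)).append (ih (fun y hy => h y (by simp [hy])))

theorem pvPartition (f : String → Int) (ks : List Int) (pool : List String)
    (hnd : ks.Nodup) (hcov : ∀ p ∈ pool, f p ∈ ks) :
    (ks.flatMap (fun c => pool.filter (fun p => f p == c))).Perm pool := by
  induction ks generalizing pool with
  | nil =>
    cases pool with
    | nil => simp
    | cons p pool => exact absurd (hcov p (by simp)) (by simp)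
  | cons c ks ih =>
    simp only [List.flatMap_cons]
    have hrest : ∀ c' ∈ ks, pool.filter (fun p => f p == c')
        = (pool.filter (fun p => !(f p == c))).filter (fun p => f p == c') := by
      intro c' hc'
      have hne : c' ≠ c := fun e => (List.nodup_cons.1 hnd).1 (e ▸ hc')
      rw [List.filter_filter]
      refine (List.filter_congr ?_).symm
      intro p _
      by_cases h : f p = c' <;> simp [h, hne]
    have hmap : ks.flatMap (fun c' => pool.filter (fun p => f p == c'))
        = ks.flatMap (fun c' => (pool.filter (fun p => !(f p == c))).filter (fun p => f p == c')) :=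
      List.flatMap_congr (fun c' hc' => hrest c' hc')
    have hcov' : ∀ p ∈ pool.filter (fun p => !(f p == c)), f p ∈ ks := by
      intro p hp
      rcases List.mem_filter.1 hp with ⟨hp1, hp2⟩
      rcases List.mem_cons.1 (hcov p hp1) with h | h
      · simp at hp2; exact absurd h hp2
      · exact h
    have ihp := ih (pool.filter (fun p => !(f p == c))) (List.nodup_cons.1 hnd).2 hcov'
    rw [hmap]
    exact (ihp.append_left _).trans (by
      simpa using List.filter_append_perm (fun p => f p == c) pool)

theorem pvISort_mem {α : Type} (lt : α → α → Bool)
    (hasym : ∀ a b, lt a b = true → lt b a = false)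
    (htrans : ∀ a b c, lt a b = true → lt b c = true → lt a c = true)
    (l : List α) {z : α} (h : z ∈ pvISort lt l) : z ∈ l :=
  (pvISort_perm lt hasym htrans l).mem_iff.1 h

theorem pvConcat_pairwise (cnt r : String → Int) (pool : List String) (ks : List Int)
    (hasc : ks.Pairwise (· < ·)) :
    (ks.flatMap (fun c => pvISort (pvLt2 r) (pool.filter (fun p => cnt p == c)))).Pairwise
      (fun a b => pvKeyLt (cnt b, r b, b) (cnt a, r a, a) = false) := by
  induction ks with
  | nil => simp
  | cons c ks ih =>
    simp only [List.flatMap_cons]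
    rcases List.pairwise_cons.1 hasc with ⟨hc, hasc'⟩
    refine List.pairwise_append.2 ⟨?_, ih hasc', ?_⟩
    · -- within the c-chunk
      refine (pvISort_pairwise (pvLt2 r) (pvLt2_asymm r) (pvLt2_trans r) _).imp_of_mem ?_
      intro a b ha hb hab
      have hca : cnt a = c := by
        have := List.mem_filter.1 (pvISort_mem _ (pvLt2_asymm r) (pvLt2_trans r) _ ha)
        simpa using this.2
      have hcb : cnt b = c := by
        have := List.mem_filter.1 (pvISort_mem _ (pvLt2_asymm r) (pvLt2_trans r) _ hb)
        simpa using this.2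
      exact pvLift_same (hca.trans hcb.symm) hab
    · -- across chunks
      intro a ha b hb
      have hca : cnt a = c := by
        have := List.mem_filter.1 (pvISort_mem _ (pvLt2_asymm r) (pvLt2_trans r) _ ha)
        simpa using this.2
      have hcb : ∃ c' ∈ ks, cnt b = c' := by
        rcases List.mem_flatMap.1 hb with ⟨c', hc', hbz⟩
        exact ⟨c', hc', by
          have := List.mem_filter.1 (pvISort_mem _ (pvLt2_asymm r) (pvLt2_trans r) _ hbz)
          simpa using this.2⟩
      rcases hcb with ⟨c', hc', hcb⟩
      exact pvLift_cross (by rw [hca, hcb]; exact hc c' hc')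

theorem pvBucket_concat (cnt r : String → Int) (pool : List String) (ks : List Int)
    (hnd : ks.Nodup) (hasc : ks.Pairwise (· < ·))
    (hcov : ∀ p ∈ pool, cnt p ∈ ks) :
    ks.flatMap (fun c => pvISort (pvLt2 r) (pool.filter (fun p => cnt p == c)))
      = pvISort (fun a b => pvKeyLt (cnt a, r a, a) (cnt b, r b, b)) pool := by
  refine (pvISort_eq_of_perm_of_pairwise _ ?_ ?_ ?_ ?_ ?_).symm
  · intro a b h; exact pvKeyLt_asymm h
  · intro a b c h1 h2; exact pvKeyLt_trans h1 h2
  · intro a b h1 h2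
    have := pvKeyLt_antisymm h1 h2
    have h3 := congrArg (fun k => k.2.2) this
    simpa using h3
  · refine (pvFlatMap_perm ks _ _ ?_).trans (pvPartition cnt ks pool hnd hcov)
    intro c _
    exact pvISort_perm _ (pvLt2_asymm r) (pvLt2_trans r) _
  · exact pvConcat_pairwise cnt r pool ks hasc

-- getD with default 0 is unchanged by one setdefault step / by pvTouch

theorem pvTouchStep_getD (pc : PySem.Dict String Int) (p q : String) :
    (if (pc.get? p).isSome then pc else pc.insert p 0).getD q 0 = pc.getD q 0 := by
  by_cases h : (pc.get? p).isSome
  · simp [h]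
  · rw [if_neg h, PySem.Dict.getD_insert]
    split_ifs with hq
    · subst hq
      rw [PySem.Dict.getD_of_get?_eq_none]
      simpa using h
    · rfl

theorem pvTouch_getD (xs : List String) (pc : PySem.Dict String Int) (q : String) :
    (pvTouch pc xs).getD q 0 = pc.getD q 0 := by
  induction xs generalizing pc with
  | nil => rfl
  | cons p xs ih =>
    simp only [pvTouch, List.foldl_cons]
    rw [show (xs.foldl (fun d p => if (d.get? p).isSome then d else d.insert p 0)
        (if (pc.get? p).isSome then pc else pc.insert p 0)) = pvTouch (if (pc.get? p).isSome then pc else pc.insert p 0) xs from rfl]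
    rw [ih, pvTouchStep_getD]

-- the one-pass loop over the pool splits into the setdefault pass and the bucket pass

theorem pvPB_split (pool : List String) :
    ∀ (pc : PySem.Dict String Int) (b : PySem.Dict Int (List String)),
    pool.foldl (fun (s : PySem.Dict String Int × PySem.Dict Int (List String)) p =>
        (if (s.1.get? p).isSome then s.1 else s.1.insert p 0,
         s.2.modify (s.1.getD p 0) [] (· ++ [p]))) (pc, b)
      = (pvTouch pc pool,
         pool.foldl (fun bd p => bd.modify (pc.getD p 0) [] (· ++ [p])) b) := by
  induction pool with
  | nil => intro pc b; rfl
  | cons p pool ih =>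
    intro pc b
    simp only [List.foldl_cons]
    rw [ih]
    have hf : (fun (bd : PySem.Dict Int (List String)) q =>
          bd.modify ((if (pc.get? p).isSome = true then pc else pc.insert p 0).getD q 0) [] (· ++ [q]))
        = (fun (bd : PySem.Dict Int (List String)) q => bd.modify (pc.getD q 0) [] (· ++ [q])) := by
      funext bd q
      rw [pvTouchStep_getD]
    rw [hf]
    rfl

-- ===== integration lemmas =====

theorem pvBuckets_getD (cnt : String → Int) (pool : List String) (c : Int) :
    (pool.foldl (fun bd p => bd.modify (cnt p) [] (· ++ [p]))
        (PySem.Dict.empty : PySem.Dict Int (List String))).getD c []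
      = pool.filter (fun p => cnt p == c) := by
  have h := PySem.Dict.getD_foldl_modify_append (pool.map (fun p => (cnt p, p)))
    (PySem.Dict.empty : PySem.Dict Int (List String)) c
  simp only [List.foldl_map] at h
  rw [h, List.filter_map, List.map_map]
  simp [Function.comp_def]

theorem pvBuckets_keys (cnt : String → Int) (pool : List String) :
    (pool.foldl (fun bd p => bd.modify (cnt p) [] (· ++ [p]))
        (PySem.Dict.empty : PySem.Dict Int (List String))).keys
      = PySem.Set.ofList (pool.map cnt) := by
  rw [PySem.Dict.keys_foldl_modify_key pool cnt [] (fun _ p => (· ++ [p])) PySem.Dict.empty]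
  rfl

theorem pvBuckets_nodup_keys (cnt : String → Int) (pool : List String) :
    (pool.foldl (fun bd p => bd.modify (cnt p) [] (· ++ [p]))
        (PySem.Dict.empty : PySem.Dict Int (List String))).keys.Nodup :=
  PySem.Dict.nodup_keys_foldl_modify_key pool cnt [] (fun _ p => (· ++ [p])) PySem.Dict.empty
    PySem.Dict.nodup_keys_empty

theorem pvKs_lt (keys : List Int) (h : keys.Nodup) :
    (PySem.List.sorted keys (fun c => c)).Pairwise (· < ·) := by
  have h1 := PySem.List.sorted_pairwise keys (fun c : Int => c)
  have h2 : (PySem.List.sorted keys (fun c => c)).Nodup :=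
    ((PySem.List.sorted_perm keys (fun c => c) false).nodup_iff).2 h
  exact (h1.and h2).imp (fun hab => lt_of_le_of_ne hab.1 hab.2)

theorem pvChunks_take (rc : PySem.Dict String Int) (bd : PySem.Dict Int (List String))
    (ks : List Int) : ∀ t : Int,
    pvChunks rc bd ks t
      = (ks.flatMap (fun c => PySem.List.sorted2 (bd.getD c [])
          (fun p => -(rc.getD p 0)) (fun p => p))).take t.toNat := by
  induction ks with
  | nil => intro t; simp [pvChunks]
  | cons c ks ih =>
    intro t
    simp only [pvChunks, List.flatMap_cons]
    by_cases ht : t ≤ 0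
    · rw [if_pos ht]
      have h0 : t.toNat = 0 := by omega
      simp [h0]
    · rw [if_neg ht, ih, List.take_append]
      congr 1
      congr 1
      rw [List.length_take]
      omega

-- sorted2 with keys (-(rc[p]), p) is the generic insertion sort under pvLt2
theorem pvSorted2_eq (rc : PySem.Dict String Int) (l : List String) :
    PySem.List.sorted2 l (fun p => -(rc.getD p 0)) (fun p => p)
      = pvISort (pvLt2 (fun p => -(rc.getD p 0))) l := rfl

-- one round's selection: A's sort-and-slice equals B's bucket consumption
theorem pvPick_eq (players : List String) (rc : PySem.Dict String Int) (group_size : Int)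
    (pc : PySem.Dict String Int) (prev : PySem.Set String) (dr : String × String) :
    (let g0 : List String := if !(dr.2 == "") && players.contains dr.2 then [dr.2] else []
     let needed : Int := group_size - (g0.length : Int)
     if needed > 0 then
       let avail := players.filter
         (fun p => !(PySem.Set.contains prev p) && !(g0.contains p))
       let cand := if (avail.length : Int) < needed
                   then players.filter (fun p => !(g0.contains p)) else avail
       let pc1 := pvTouch pc cand
       (g0 ++ (pvSortBy (pvKey pc1 rc) cand).take needed.toNat, pc1)
     else (g0, pc))
    = pvPickB players rc group_size pc prev dr := by
  simp only [pvPickB]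
  set g0 : List String := if !(dr.2 == "") && players.contains dr.2 then [dr.2] else [] with hg0
  set needed : Int := group_size - (g0.length : Int) with hneeded
  by_cases hn : needed > 0
  · simp only [hn, if_true]
    have havail : players.filter
        (fun p => !(PySem.Set.contains prev p) && !(g0.contains p))
      = (players.filter (fun p => !(g0.contains p))).filter
          (fun p => !(PySem.Set.contains prev p)) := by
      rw [List.filter_filter]
    rw [havail]
    set base := players.filter (fun p => !(g0.contains p))
    set avail := base.filter (fun p => !(PySem.Set.contains prev p))
    have hcond : (if (avail.length : Int) < needed then base else avail)
        = (if (avail.length : Int) ≥ needed then avail else base) := by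
      split_ifs with h1 h2 h3 <;> first | rfl | omega
    rw [hcond]
    set pool := if (avail.length : Int) ≥ needed then avail else base with hpool
    -- split B's one-pass fold
    rw [pvPB_split pool pc PySem.Dict.empty]
    set cnt : String → Int := fun p => pc.getD p 0 with hcnt
    set r : String → Int := fun p => -(rc.getD p 0) with hr
    set bd := pool.foldl (fun bd p => bd.modify (cnt p) [] (· ++ [p]))
      (PySem.Dict.empty : PySem.Dict Int (List String)) with hbd
    set ks := PySem.List.sorted bd.keys (fun c => c) with hks
    -- B's group: chunks = take of the flatMap, flatMap = the full sort
    have hkeysnd : bd.keys.Nodup := pvBuckets_nodup_keys cnt pool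
    have hksnd : ks.Nodup := ((PySem.List.sorted_perm bd.keys (fun c => c) false).nodup_iff).2 hkeysnd
    have hksasc : ks.Pairwise (· < ·) := pvKs_lt bd.keys hkeysnd
    have hcov : ∀ p ∈ pool, cnt p ∈ ks := by
      intro p hp
      have h1 : cnt p ∈ bd.keys := by
        rw [pvBuckets_keys cnt pool]
        exact (PySem.Set.mem_ofList _ _).2 (List.mem_map.2 ⟨p, hp, rfl⟩)
      exact ((PySem.List.sorted_perm bd.keys (fun c => c) false).mem_iff).2 h1
    have hflat : ks.flatMap (fun c => PySem.List.sorted2 (bd.getD c []) r (fun p => p))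
        = pvISort (fun a b => pvKeyLt (cnt a, r a, a) (cnt b, r b, b)) pool := by
      have hgd : ∀ c, bd.getD c [] = pool.filter (fun p => cnt p == c) :=
        fun c => pvBuckets_getD cnt pool c
      calc ks.flatMap (fun c => PySem.List.sorted2 (bd.getD c []) r (fun p => p))
          = ks.flatMap (fun c => pvISort (pvLt2 r) (pool.filter (fun p => cnt p == c))) := by
            refine List.flatMap_congr ?_
            intro c _
            rw [pvSorted2_eq, hgd c]
        _ = pvISort (fun a b => pvKeyLt (cnt a, r a, a) (cnt b, r b, b)) pool :=
            pvBucket_concat cnt r pool ks hksnd hksasc hcov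
    -- A's sort over the same pool, with the same keys
    have hkeyeq : (fun a b => pvKeyLt (pvKey (pvTouch pc pool) rc a) (pvKey (pvTouch pc pool) rc b))
        = (fun a b => pvKeyLt (cnt a, r a, a) (cnt b, r b, b)) := by
      funext a b
      simp only [pvKey, pvTouch_getD, hcnt, hr]
    have hsort : pvSortBy (pvKey (pvTouch pc pool) rc) pool
        = pvISort (fun a b => pvKeyLt (cnt a, r a, a) (cnt b, r b, b)) pool := by
      show pvISort (fun a b => pvKeyLt (pvKey (pvTouch pc pool) rc a) (pvKey (pvTouch pc pool) rc b)) pool = _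
      rw [hkeyeq]
    have hlen : (pvISort (fun a b => pvKeyLt (cnt a, r a, a) (cnt b, r b, b)) pool).length
        = pool.length :=
      (pvISort_perm (lt := fun a b => pvKeyLt (cnt a, r a, a) (cnt b, r b, b))
        (fun a b h => pvKeyLt_asymm h) (fun a b c h1 h2 => pvKeyLt_trans h1 h2) pool).length_eq
    rw [pvChunks_take, hflat, hsort]
    congr 1
    have htn : (min needed (pool.length : Int)).toNat = min needed.toNat pool.length := by omega
    rw [htn, List.take_eq_take_min, hlen]
  · simp only [hn, if_false]

-- one round of A equals one round of B
theorem pvStep_eq (players : List String) (rc : PySem.Dict String Int) (group_size : Int)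
    (sched : PySem.Dict String (List String)) (pc : PySem.Dict String Int)
    (prev : PySem.Set String) (dr : String × String) :
    pvStepA players rc group_size (sched, pc, prev) dr =
      ((sched.insert dr.1 (PySem.List.sorted (pvPickB players rc group_size pc prev dr).1 (fun x => x))),
       ((pvPickB players rc group_size pc prev dr).1.foldl
          (fun d p => d.insert p (d.getD p 0 + 1)) (pvPickB players rc group_size pc prev dr).2),
       PySem.Set.ofList (pvPickB players rc group_size pc prev dr).1) := by
  simp only [pvStepA]
  rw [pvPick_eq players rc group_size pc prev dr]

-- the two reservation tallies agree
-- Dict.modify k 0 (·+1) is by definition insert k (getD k 0 + 1): A's defaultdict increment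
theorem pvRc_aux (l : List (String × String)) :
    ∀ d : PySem.Dict String Int,
    l.foldl (fun d pr => if !(pr.2 == "") then d.insert pr.2 (d.getD pr.2 0 + 1) else d) d
      = ((l.map (fun pr => pr.2)).filter (fun r => !(r == ""))).foldl
          (fun d x => d.modify x 0 (· + 1)) d := by
  induction l with
  | nil => intro d; rfl
  | cons pr l ih =>
    intro d
    by_cases h : pr.2 = ""
    · simp only [List.foldl_cons, List.map_cons, List.filter_cons]
      have hb : (!(pr.2 == "")) = false := by simp [h]
      rw [hb]
      simp only [Bool.false_eq_true, if_false]
      exact ih d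
    · simp only [List.foldl_cons, List.map_cons, List.filter_cons]
      have hb : (!(pr.2 == "")) = true := by simp [h]
      rw [hb]
      rw [ih]
      rfl

theorem pvRc_eq (reservations : List (String × String)) :
    reservations.foldl
      (fun d pr => if !(pr.2 == "") then d.insert pr.2 (d.getD pr.2 0 + 1) else d)
      (PySem.Dict.empty : PySem.Dict String Int)
    = PySem.Dict.counter ((reservations.map (fun pr => pr.2)).filter (fun r => !(r == ""))) := by
  rw [PySem.Dict.counter_eq_foldl]
  exact pvRc_aux reservations PySem.Dict.empty

-- the whole loops agree
theorem pvRounds_eq (players : List String) (rc : PySem.Dict String Int) (group_size : Int)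
    (reservations : List (String × String)) :
    ∀ (sched : PySem.Dict String (List String)) (pc : PySem.Dict String Int)
      (prev : PySem.Set String),
    (((reservations.foldl (pvStepA players rc group_size) (sched, pc, prev)).1),
      ((reservations.foldl (pvStepA players rc group_size) (sched, pc, prev)).2.1))
      = pvRoundsB players rc group_size reservations sched pc prev := by
  induction reservations with
  | nil => intro sched pc prev; rfl
  | cons dr rest ih =>
    intro sched pc prev
    simp only [List.foldl_cons, pvRoundsB]
    rw [pvStep_eq players rc group_size sched pc prev dr]
    exact ih _ _ _

-- ===== VERDICT (by name: the statement is the Claim_ definition above) =====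
theorem schedule_golf_groups_spec : Claim_equal_schedule_golf_groups := by
  intro players reservations group_size _
  unfold Spec_schedule_golf_groups schedule_golf_groups schedule_golf_groups_alt
  rw [pvRc_eq]
  have h := pvRounds_eq players
    (PySem.Dict.counter ((reservations.map (fun pr => pr.2)).filter (fun r => !(r == ""))))
    group_size reservations PySem.Dict.empty PySem.Dict.empty PySem.Set.empty
  exact congrArg (fun q => (q.1.items, q.2.items)) h
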